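-- pv_equiv track=rewrite | github.com/yovanycunha/P1 | eliminamenores/eliminamenores.py | elimina_menores
-- ===== SOURCE A (Python) =====
-- def elimina_menores(num, lista):
-- 	removidos = 0
-- 	ficaram = []
-- 	for i in range(len(lista)-1,-1,-1):
-- 		if lista[i] < num:
-- 			lista.remove(lista[i])
-- 			removidos += 1
-- 	return removidos
-- ===== SOURCE B (Python) =====
-- def elimina_menores(num, lista):
--     # forward two-pointer compaction: write kept elements at cursor k, then truncate
--     k = 0
--     for x in lista:
--         if not (x < num):
--             lista[k] = x
--             k += 1
--     removidos = len(lista) - k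
--     del lista[k:]
--     return removidos
-- ===== Notes on version B (the rewrite author's own statement) =====
-- stated objective: faster
-- what changed: Replaces A's backward index loop with repeated list.remove (each remove rescans and shifts the list) by a single forward two-pointer compaction pass with a write cursor, returning len(lista)-k.
import Mathlib
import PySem

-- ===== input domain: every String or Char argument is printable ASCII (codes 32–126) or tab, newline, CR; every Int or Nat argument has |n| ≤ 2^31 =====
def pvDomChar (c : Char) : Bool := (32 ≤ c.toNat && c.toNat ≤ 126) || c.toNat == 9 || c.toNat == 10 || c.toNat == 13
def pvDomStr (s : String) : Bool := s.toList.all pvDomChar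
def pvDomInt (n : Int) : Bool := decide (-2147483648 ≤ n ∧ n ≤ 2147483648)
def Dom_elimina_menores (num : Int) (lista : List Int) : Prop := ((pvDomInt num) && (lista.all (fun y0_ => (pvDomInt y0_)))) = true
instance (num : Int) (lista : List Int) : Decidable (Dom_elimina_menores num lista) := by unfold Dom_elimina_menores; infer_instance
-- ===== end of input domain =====

-- B replaces A's backward loop with repeated list.remove by a single forward two-pointer
-- compaction pass (objective: faster). Both Pythons mutate `lista` to the same filtered list;
-- the equivalence proved here is about the RETURN value (the count of removed elements).

-- ===== PORT A =====
-- one iteration of A's backward loop: read lista[i]; if < num, remove the first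
-- occurrence of that value and bump the counter.  The `none` branches are the
-- IndexError/ValueError cases, which this loop never reaches (i is always in range
-- and the read value is always present); keeping the state there is a harmless default.
def pvStepA (num : Int) (s : List Int × Int) (i : Int) : List Int × Int :=
  match PySem.List.pyGet? s.1 i with
  | none => s
  | some v =>
    if v < num then
      match PySem.List.remove? s.1 v with
      | none => s
      | some l' => (l', s.2 + 1)
    else s

def elimina_menores (num : Int) (lista : List Int) : Int :=
  ((PySem.List.pyRange ((lista.length : Int) - 1) (-1) (-1)).foldl (pvStepA num) (lista, 0)).2

-- ===== PORT B =====
-- forward pass with write cursor k (the in-place writes lista[k] = x do not affect the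
-- returned count, so the port carries only k); returns len(lista) - k.
def elimina_menores_alt (num : Int) (lista : List Int) : Int :=
  (lista.length : Int) -
    lista.foldl (fun k x => if ¬ (x < num) then k + 1 else k) (0 : Int)

-- ===== PRECONDITION & SPEC =====
def Spec_elimina_menores (num : Int) (lista : List Int) (out : Int) : Prop := out = elimina_menores_alt num lista
instance (num : Int) (lista : List Int) (out : Int) : Decidable (Spec_elimina_menores num lista out) := by unfold Spec_elimina_menores; infer_instance

-- ===== CLAIM (what is proved, stated in full; the proofs are below) =====
def Claim_equal_elimina_menores : Prop := ∀ (num : Int) (lista : List Int), Dom_elimina_menores num lista → Spec_elimina_menores num lista (elimina_menores num lista)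

-- ===== LEMMAS AND PROOFS =====

-- Invariant proof for A's loop: with the current list split as `front ++ back` where every
-- element of `back` is ≥ num, running the countdown over the indices of `front` adds exactly
-- (number of elements of `front` that are < num) to the counter.
lemma loopA_eq (num : Int) : ∀ (n : Nat) (front back : List Int) (r : Int),
    front.length = n → (∀ x ∈ back, ¬ x < num) →
    ((PySem.List.pyRange ((n : Int) - 1) (-1) (-1)).foldl (pvStepA num) (front ++ back, r)).2
      = r + (front.countP (fun x => decide (x < num)) : Int) := by
  intro n
  induction n with
  | zero =>
    intro front back r hlen _
    rw [List.length_eq_zero_iff] at hlen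
    subst hlen
    rw [PySem.List.pyRange_neg_one_eq_nil (by omega)]
    simp
  | succ m ih =>
    intro front back r hlen hback
    rcases List.eq_nil_or_concat front with h | ⟨f, x, rfl⟩
    · simp [h] at hlen
    simp only [List.concat_eq_append] at hlen ⊢
    have hf : f.length = m := by simpa using hlen
    rw [PySem.List.pyRange_neg_one_cons (by omega)]
    rw [List.foldl_cons]
    push_cast
    simp only [List.append_assoc, List.singleton_append]
    have hidx : ((m : Int) + 1 - 1) = (f.length : Int) := by omega
    have hget : PySem.List.pyGet? (f ++ x :: back) ((m : Int) + 1 - 1) = some x := by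
      rw [hidx]; exact PySem.List.pyGet?_append_length _ _ _
    have hcast : ((m : Int) + 1 - 1 - 1) = (m : Int) - 1 := by omega
    by_cases hx : x < num
    · -- element removed: first occurrence of x lies within f ++ [x] (back is all ≥ num > x)
      have hxmem : x ∈ f ++ x :: back := by simp
      have hrem : PySem.List.remove? (f ++ x :: back) x
          = some ((f ++ x :: back).erase x) :=
        PySem.List.remove?_eq_some_erase _ _ hxmem
      have hstep : pvStepA num (f ++ x :: back, r) ((m : Int) + 1 - 1)
          = ((f ++ x :: back).erase x, r + 1) := by
        simp only [pvStepA, hget, hrem]; simp [hx]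
      rw [hstep, hcast]
      by_cases hxf : x ∈ f
      · have herase : (f ++ x :: back).erase x = (f.erase x ++ [x]) ++ back := by
          rw [List.erase_append_left _ hxf]; simp
        have hlen' : (f.erase x ++ [x]).length = m := by
          have h1 := List.length_erase_of_mem hxf
          have h2 := List.length_pos_of_mem hxf
          simp only [List.length_append, List.length_singleton, h1]
          omega
        rw [herase, ih (f.erase x ++ [x]) back (r + 1) hlen' hback]
        -- counting: f ~ x :: f.erase x, and x counts as (x < num)
        have hperm : f.Perm (x :: f.erase x) := List.perm_cons_erase hxf
        have hcnt : f.countP (fun y => decide (y < num))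
            = (x :: f.erase x).countP (fun y => decide (y < num)) := hperm.countP_eq _
        rw [List.countP_cons] at hcnt
        simp [List.countP_append, hx] at hcnt ⊢
        omega
      · have herase : (f ++ x :: back).erase x = f ++ back := by
          rw [List.erase_append_right _ hxf, List.erase_cons_head]
        rw [herase, ih f back (r + 1) hf hback]
        simp [List.countP_append, hx]
        omega
    · -- element kept: state unchanged, x joins the "all ≥ num" tail
      have hstep : pvStepA num (f ++ x :: back, r) ((m : Int) + 1 - 1)
          = (f ++ x :: back, r) := by
        simp only [pvStepA, hget]; simp [hx]
      have hback' : ∀ y ∈ x :: back, ¬ y < num := by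
        intro y hy
        rcases List.mem_cons.mp hy with rfl | hy
        · exact hx
        · exact hback y hy
      rw [hstep, hcast, ih f (x :: back) r hf hback']
      simp [List.countP_append, hx]

-- B's fold counts the kept elements.
lemma foldB_eq (num : Int) : ∀ (l : List Int) (c : Int),
    l.foldl (fun k x => if ¬ (x < num) then k + 1 else k) c
      = c + (l.countP (fun x => !decide (x < num)) : Int) := by
  intro l
  induction l with
  | nil => intro c; simp
  | cons x t ih =>
    intro c
    rw [List.foldl_cons, List.countP_cons, ih]
    by_cases hx : x < num <;> simp [hx] <;> omega

-- ===== VERDICT (by name: the statement is the Claim_ definition above) =====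
theorem elimina_menores_spec : Claim_equal_elimina_menores := by
  intro num lista _
  unfold Spec_elimina_menores elimina_menores elimina_menores_alt
  have hA := loopA_eq num lista.length lista [] 0 rfl (by simp)
  rw [List.append_nil] at hA
  rw [hA, foldB_eq]
  have := lista.length_eq_countP_add_countP (fun x => decide (x < num))
  simp only [decide_not, Bool.decide_eq_true] at this ⊢
  omega
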